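-- pv_equiv track=rewrite | github.com/EloiNavet/ViT-Stability-Neurodegeneration | visualizations/visualize_intability_seeds.py | extract_architecture_from_name
-- ===== SOURCE A (Python) =====
-- ARCHITECTURE_PREFIX_MAPPING = {
--     "resnet": "ResNet",
--     "swin": "Swin",
--     "swindpl": "Swin DPL",
--     "vit": "ViT",
--     "medvit": "MedViT",
--     "svm": "SVM",
-- }
--
-- def extract_architecture_from_name(model_name):
--     """
--     Extract architecture name from model name using ARCHITECTURE_PREFIX_MAPPING.
--
--     Args:
--         model_name: Full model name (e.g., "resnet-5c-no_seed-baseline-1/...")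
--
--     Returns:
--         Tuple of (architecture_display_name, prefix_used) or (None, None) if no match
--     """
--     # Get the base name before any "/" or run ID
--     if "/" in model_name:
--         base = model_name.split("/")[0]
--     else:
--         base = model_name
--
--     base_lower = base.lower()
--
--     # Sort prefixes by length (longest first) to match more specific prefixes first
--     sorted_prefixes = sorted(ARCHITECTURE_PREFIX_MAPPING.keys(), key=len, reverse=True)
--
--     for prefix in sorted_prefixes:
--         if base_lower.startswith(prefix):
--             return ARCHITECTURE_PREFIX_MAPPING[prefix], prefix
--
--     return None, None
-- ===== SOURCE B (Python) =====
-- ARCHITECTURE_PREFIX_MAPPING = {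
--     "resnet": "ResNet",
--     "swin": "Swin",
--     "swindpl": "Swin DPL",
--     "vit": "ViT",
--     "medvit": "MedViT",
--     "svm": "SVM",
-- }
--
-- def extract_architecture_from_name(model_name):
--     """Single pass over the mapping keeping the longest matching prefix (no sort)."""
--     if "/" in model_name:
--         base = model_name.split("/")[0]
--     else:
--         base = model_name
--     base_lower = base.lower()
--
--     best = (None, None)
--     best_len = -1
--     for prefix, display in ARCHITECTURE_PREFIX_MAPPING.items():
--         if len(prefix) > best_len and base_lower.startswith(prefix):
--             best = (display, prefix)
--             best_len = len(prefix)
--     return best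
-- ===== Notes on version B (the rewrite author's own statement) =====
-- stated objective: simpler
-- what changed: Replaces sort-keys-by-length-then-first-match with a single unsorted pass over the mapping items that tracks the longest matching prefix seen so far (strict > keeps insertion-order tie-breaking identical).
import Mathlib
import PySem

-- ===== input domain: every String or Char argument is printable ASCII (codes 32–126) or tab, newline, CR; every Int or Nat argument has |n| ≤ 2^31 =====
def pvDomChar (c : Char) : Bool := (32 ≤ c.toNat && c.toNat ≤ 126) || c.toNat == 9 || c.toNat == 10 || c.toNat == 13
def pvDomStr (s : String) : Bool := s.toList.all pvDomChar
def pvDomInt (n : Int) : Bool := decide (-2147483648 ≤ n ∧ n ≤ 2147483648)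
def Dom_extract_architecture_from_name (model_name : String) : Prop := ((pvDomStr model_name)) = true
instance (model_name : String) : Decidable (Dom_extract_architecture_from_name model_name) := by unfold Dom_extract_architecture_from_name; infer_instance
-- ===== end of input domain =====

-- B replaces A's sort-by-length-then-first-match with one unsorted pass tracking the longest matching prefix (objective: simpler).

-- ===== PORT A =====
def archDict : PySem.Dict String String :=
  PySem.Dict.mk [("resnet", "ResNet"), ("swin", "Swin"), ("swindpl", "Swin DPL"),
                 ("vit", "ViT"), ("medvit", "MedViT"), ("svm", "SVM")]

def archLoopA (bl : String) : List String → Option String × Option String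
  | [] => (none, none)
  | p :: rest =>
      if PySem.Str.startswith bl p then (some (archDict.getD p ""), some p)
      else archLoopA bl rest

def extract_architecture_from_name (model_name : String) : Option String × Option String :=
  let base := if PySem.Str.isIn "/" model_name then ((PySem.Str.split? model_name "/").getD []).headD "" else model_name
  let base_lower := PySem.Str.lower base
  let sorted_prefixes := PySem.List.sorted archDict.keys (key := fun p => PySem.Str.len p) (reverse := true)
  archLoopA base_lower sorted_prefixes

-- ===== PORT B =====
def extract_architecture_from_name_alt (model_name : String) : Option String × Option String :=
  let base := if PySem.Str.isIn "/" model_name then ((PySem.Str.split? model_name "/").getD []).headD "" else model_name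
  let base_lower := PySem.Str.lower base
  let r := archDict.items.foldl
    (fun (acc : (Option String × Option String) × Int) pd =>
      if PySem.Str.len pd.1 > acc.2 && PySem.Str.startswith base_lower pd.1 then
        ((some pd.2, some pd.1), PySem.Str.len pd.1)
      else acc)
    ((none, none), -1)
  r.1

-- ===== PRECONDITION & SPEC =====
def Spec_extract_architecture_from_name (model_name : String) (out : Option String × Option String) : Prop := out = extract_architecture_from_name_alt model_name
instance (model_name : String) (out : Option String × Option String) : Decidable (Spec_extract_architecture_from_name model_name out) := by unfold Spec_extract_architecture_from_name; infer_instance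

-- ===== CLAIM (what is proved, stated in full; the proofs are below) =====
def Claim_equal_extract_architecture_from_name : Prop := ∀ (model_name : String), Dom_extract_architecture_from_name model_name → Spec_extract_architecture_from_name model_name (extract_architecture_from_name model_name)

-- ===== LEMMAS AND PROOFS =====

-- the sorted (longest-first, stable) order of the six prefixes, as a literal
theorem archSorted_eval :
    PySem.List.sorted archDict.keys (key := fun p => PySem.Str.len p) (reverse := true)
      = ["swindpl", "resnet", "medvit", "swin", "vit", "svm"] := by decide

-- core: first match in the sorted order = longest-match fold over the dict items, for any base_lower
theorem archLoop_eq_fold (bl : String) :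
    archLoopA bl ["swindpl", "resnet", "medvit", "swin", "vit", "svm"]
      = (archDict.items.foldl
          (fun (acc : (Option String × Option String) × Int) pd =>
            if PySem.Str.len pd.1 > acc.2 && PySem.Str.startswith bl pd.1 then
              ((some pd.2, some pd.1), PySem.Str.len pd.1)
            else acc)
          ((none, none), -1)).1 := by
  cases h1 : PySem.Chars.startswith bl.toList ['s', 'w', 'i', 'n', 'd', 'p', 'l'] <;>
  cases h2 : PySem.Chars.startswith bl.toList ['r', 'e', 's', 'n', 'e', 't'] <;>
  cases h3 : PySem.Chars.startswith bl.toList ['m', 'e', 'd', 'v', 'i', 't'] <;>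
  cases h4 : PySem.Chars.startswith bl.toList ['s', 'w', 'i', 'n'] <;>
  cases h5 : PySem.Chars.startswith bl.toList ['v', 'i', 't'] <;>
  cases h6 : PySem.Chars.startswith bl.toList ['s', 'v', 'm'] <;>
    simp [archLoopA, archDict, List.foldl, h1, h2, h3, h4, h5, h6,
          PySem.Dict.getD, PySem.Str.len] <;> decide

-- ===== VERDICT (by name: the statement is the Claim_ definition above) =====
theorem extract_architecture_from_name_spec : Claim_equal_extract_architecture_from_name := by
  intro m _
  show _ = _
  unfold extract_architecture_from_name extract_architecture_from_name_alt
  simp only [archSorted_eval]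
  exact archLoop_eq_fold _
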